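-- pv_equiv track=rewrite | github.com/pypi-data/pypi-mirror-309 | packages/lingpatlab/lingpatlab-0.2.13.tar.gz/lingpatlab-0.2.13/lingpatlab/tokenizer/dmo/text_utils.py | find_subsumed_tokens
-- ===== SOURCE A (Python) =====
-- def find_subsumed_tokens(tokens: list) -> list:
--     """ Find Subsumed Tokens (if any)
--
--     Version:
--         >= 0.1.6
--
--     For Example:
--         '1 pm' contains 'pm' thus '1 pm' subsumes (asorbs) 'pm'
--
--     Reference:
--
--
--     Args:
--         tokens (list): the incoming tokens
--         Sample Input:
--             ['tomorrow', 'meeting', '1 pm', 'pm']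
--
--     Returns:
--         list: the subsumed tokens (if any)
--         Sample Output:
--             ['pm']
--     """
--
--     def exists(item_1: str, item_2: str) -> bool:
--         token_lr = f' {item_1} '
--         if token_lr in item_2:
--             return True
--
--         token_l = f' {item_1}'
--         if item_2.endswith(token_l):
--             return True
--
--         token_r = f'{item_1} '
--         if item_2.startswith(token_r):
--             return True
--
--         return False
--
--     pairs = []
--     for i1 in tokens:
--         for i2 in [x for x in tokens if i1 != x]:
--             pairs.append(sorted({i1, i2}, reverse=False))
--
--     excludes = set()
--     for pair in pairs:
--         if exists(pair[0], pair[1]):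
--             excludes.add(pair[0])
--
--     if not len(excludes):
--         return []
--
--     return sorted(excludes)
-- ===== SOURCE B (Python) =====
-- def find_subsumed_tokens(tokens: list) -> list:
--     """Find tokens that occur as a space-delimited segment inside another token.
--
--     Instead of comparing every pair of tokens, wrap each token in spaces and
--     enumerate its space-bounded segments once, checking each segment against a
--     hash set of all tokens.
--     """
--     token_set = set(tokens)
--     subsumed = set()
--     for y in token_set:
--         wy = ' ' + y + ' '
--         spaces = [i for i, c in enumerate(wy) if c == ' ']
--         for a in range(len(spaces)):
--             for b in range(a + 1, len(spaces)):
--                 s = wy[spaces[a] + 1:spaces[b]]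
--                 if s != y and s in token_set:
--                     subsumed.add(s)
--     return sorted(subsumed)
-- ===== Notes on version B (the rewrite author's own statement) =====
-- stated objective: faster
-- what changed: Instead of materialising all O(n^2) ordered pairs and substring-testing each, B builds the token set once and, for each distinct token, enumerates the space-bounded segments of ' '+token+' ' and looks each segment up in the set; B also fixes A's direction bug (A only tests the lexicographically smaller token of a pair for containment in the larger).
-- intended difference: On inputs where some token occurs as a space-delimited word only inside lexicographically smaller tokens (e.g. ['a z','z']), A returns a list omitting it (A only tests the smaller pair element for containment in the larger, contradicting its own docstring example ['tomorrow','meeting','1 pm','pm'] -> ['pm']), while B includes it, which is the intended behaviour. — e.g. on find_subsumed_tokens(["a z", "z"]): A returns [], B returns ["z"]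
import Mathlib
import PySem

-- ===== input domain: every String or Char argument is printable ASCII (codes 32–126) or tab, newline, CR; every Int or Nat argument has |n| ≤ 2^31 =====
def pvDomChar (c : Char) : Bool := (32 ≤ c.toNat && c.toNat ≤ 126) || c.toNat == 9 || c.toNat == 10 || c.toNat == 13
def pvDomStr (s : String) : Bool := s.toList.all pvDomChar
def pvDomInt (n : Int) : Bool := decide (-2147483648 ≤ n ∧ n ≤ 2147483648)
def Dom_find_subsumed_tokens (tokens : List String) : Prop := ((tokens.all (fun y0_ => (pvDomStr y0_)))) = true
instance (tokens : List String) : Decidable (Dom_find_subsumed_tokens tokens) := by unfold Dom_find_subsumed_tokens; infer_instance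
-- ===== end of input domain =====

-- B replaces A's all-pairs scan by one pass per distinct token that enumerates its
-- space-bounded segments against a hash set of all tokens; B also reports a token that is
-- word-contained only in lexicographically smaller tokens, which A misses (see D_ below).
-- Lean-side note: Python string comparisons are ported as comparisons of the
-- code-point lists (String.toList), which is exactly Python's string order.

-- ===== PORT A =====

-- A's nested helper `exists(item_1, item_2)`: three early-return containment checks.
def pvExists (item1 item2 : String) : Bool :=
  if PySem.Chars.isIn (' ' :: (item1.toList ++ [' '])) item2.toList then true
  else if PySem.Chars.endswith item2.toList (' ' :: item1.toList) then true
  else if PySem.Chars.startswith item2.toList (item1.toList ++ [' ']) then true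
  else false

-- `sorted({i1, i2}, reverse=False)`
def pvSortedPair (i1 i2 : String) : List String :=
  PySem.List.sorted (PySem.Set.ofList [i1, i2]) (fun x => x.toList) false

-- the `pairs` loop
def pvPairs (tokens : List String) : List (List String) :=
  tokens.foldl
    (fun acc i1 =>
      (tokens.filter (fun x => i1 != x)).foldl
        (fun acc i2 => acc ++ [pvSortedPair i1 i2]) acc)
    []

-- the `excludes` loop (a Python set built with .add)
def pvExcludes (tokens : List String) : List String :=
  (pvPairs tokens).foldl
    (fun s pair =>
      if pvExists (PySem.List.pyGetD pair 0 "") (PySem.List.pyGetD pair 1 "")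
      then PySem.Set.add s (PySem.List.pyGetD pair 0 "") else s)
    []

def find_subsumed_tokens (tokens : List String) : List String :=
  if PySem.Set.len (pvExcludes tokens) = 0 then []
  else PySem.List.sorted (pvExcludes tokens) (fun x => x.toList) false

-- ===== PORT B =====

-- `spaces = [i for i, c in enumerate(wy) if c == ' ']`
def pvSpaces (wy : List Char) : List Int :=
  ((PySem.List.enumerate wy 0).filter (fun p => p.2 == ' ')).map (fun p => p.1)

-- B's `subsumed` set: for each distinct token y, test every space-bounded segment of
-- ' ' + y + ' ' against the token set.
def pvSubsumed (tokens : List String) : List String :=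
  let tset := PySem.Set.ofList tokens
  tset.foldl
    (fun sub y =>
      let wy : List Char := ' ' :: (y.toList ++ [' '])
      let spaces := pvSpaces wy
      (PySem.List.pyRange 0 (spaces.length : Int) 1).foldl
        (fun sub a =>
          (PySem.List.pyRange (a + 1) (spaces.length : Int) 1).foldl
            (fun sub b =>
              let s := String.ofList (PySem.List.slice wy
                (some (PySem.List.pyGetD spaces a 0 + 1))
                (some (PySem.List.pyGetD spaces b 0)))
              if s ≠ y ∧ PySem.Set.contains tset s = true
              then PySem.Set.add sub s else sub)
            sub)
        sub)
    []

def find_subsumed_tokens_alt (tokens : List String) : List String :=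
  PySem.List.sorted (pvSubsumed tokens) (fun x => x.toList) false

-- ===== PRECONDITION & SPEC =====

-- A only tests whether the lexicographically SMALLER token of each pair is word-contained
-- in the larger one, so a token x that is word-contained (' x ' a substring of ' z ',
-- stated with Mathlib's infix relation <:+:) only in smaller tokens (e.g. 'z' in 'a z')
-- is silently dropped by A — contradicting A's own docstring example — while B reports it,
-- which is the intended behaviour.
def D_find_subsumed_tokens (tokens : List String) : Prop :=
  ∃ x ∈ tokens, ∃ z ∈ tokens, z.toList < x.toList ∧
    (" " ++ x ++ " ").toList <:+: (" " ++ z ++ " ").toList ∧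
    ∀ z' ∈ tokens, x.toList < z'.toList →
      ¬ (" " ++ x ++ " ").toList <:+: (" " ++ z' ++ " ").toList
instance (tokens : List String) : Decidable (D_find_subsumed_tokens tokens) := by
  unfold D_find_subsumed_tokens; infer_instance

def Spec_find_subsumed_tokens (tokens : List String) (out : List String) : Prop :=
  ¬ D_find_subsumed_tokens tokens → out = find_subsumed_tokens_alt tokens
instance (tokens : List String) (out : List String) : Decidable (Spec_find_subsumed_tokens tokens out) := by
  unfold Spec_find_subsumed_tokens; infer_instance

def pvDiffWitness_find_subsumed_tokens : List String := ["a z", "z"]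
def pvDiffWitnessOut_find_subsumed_tokens : (List String) × (List String) := ([], ["z"])

-- ===== CLAIM (what is proved, stated in full; the proofs are below) =====
def Claim_unchanged_find_subsumed_tokens : Prop := ∀ (tokens : List String), Dom_find_subsumed_tokens tokens → Spec_find_subsumed_tokens tokens (find_subsumed_tokens tokens)
def Claim_changed_find_subsumed_tokens : Prop := Dom_find_subsumed_tokens (pvDiffWitness_find_subsumed_tokens) ∧ D_find_subsumed_tokens (pvDiffWitness_find_subsumed_tokens) ∧ find_subsumed_tokens (pvDiffWitness_find_subsumed_tokens) = pvDiffWitnessOut_find_subsumed_tokens.1 ∧ find_subsumed_tokens_alt (pvDiffWitness_find_subsumed_tokens) = pvDiffWitnessOut_find_subsumed_tokens.2 ∧ pvDiffWitnessOut_find_subsumed_tokens.1 ≠ pvDiffWitnessOut_find_subsumed_tokens.2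
def Claim_exact_find_subsumed_tokens : Prop := ∀ (tokens : List String), Dom_find_subsumed_tokens tokens → D_find_subsumed_tokens tokens → find_subsumed_tokens tokens ≠ find_subsumed_tokens_alt tokens

-- ===== LEMMAS AND PROOFS =====

-- "x is a space-delimited word of y", list level (proof-side shorthand)
def pvW (x y : List Char) : Prop := (' ' :: (x ++ [' '])) <:+: (' ' :: (y ++ [' ']))

-- D_'s space-wrapped infix relation agrees with the proof-side pvW
theorem pvWrapList (x : String) : (" " ++ x ++ " ").toList = ' ' :: (x.toList ++ [' ']) := by
  simp

theorem pvWrap_iff (x z : String) :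
    (" " ++ x ++ " ").toList <:+: (" " ++ z ++ " ").toList ↔ pvW x.toList z.toList := by
  rw [pvWrapList, pvWrapList]; exact Iff.rfl

-- order facts for List Char, transported across the definitionally equal LT instances
theorem pvTri (a b : List Char) : a < b ∨ a = b ∨ b < a := lt_trichotomy a b

theorem pvAsymm {a b : List Char} (h : a < b) : ¬ b < a := lt_asymm h

theorem pvIrrefl (a : List Char) : ¬ a < a := lt_irrefl a

-- the ports' sorted-with-core-instances equals sorted with the LinearOrder instances
theorem pvSortedBridge (xs : List String) :
    PySem.List.sorted xs (fun x => x.toList) false =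
      @PySem.List.sorted String (List Char) List.instLinearOrder.toLT
        (fun a b => LinearOrder.toDecidableLT a b) xs (fun x => x.toList) false := by
  have h : (fun (a b : List Char) => a.decidableLT b) =
      (fun a b => @LinearOrder.toDecidableLT (List Char) _ a b) := by
    funext a b; exact Subsingleton.elim _ _
  rw [show (fun (a b : List Char) => a.decidableLT b) =
      (fun a b => @LinearOrder.toDecidableLT (List Char) _ a b) from h]

-- generic membership through a fold whose step adds elements characterised by Q
theorem pvMemFoldl {α β : Type} (step : List β → α → List β) (Q : α → β → Prop)
    (h : ∀ s e x, x ∈ step s e ↔ x ∈ s ∨ Q e x) :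
    ∀ (l : List α) (s0 : List β) (x : β),
      x ∈ l.foldl step s0 ↔ x ∈ s0 ∨ ∃ e ∈ l, Q e x := by
  intro l
  induction l with
  | nil => intro s0 x; simp
  | cons e t ih =>
      intro s0 x
      simp only [List.foldl_cons, List.mem_cons]
      rw [ih, h]
      constructor
      · rintro (( hs | hq ) | ⟨e', he', hq'⟩)
        · exact Or.inl hs
        · exact Or.inr ⟨e, Or.inl rfl, hq⟩
        · exact Or.inr ⟨e', Or.inr he', hq'⟩
      · rintro (hs | ⟨e', (rfl | he'), hq'⟩)
        · exact Or.inl (Or.inl hs)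
        · exact Or.inl (Or.inr hq')
        · exact Or.inr ⟨e', he', hq'⟩

-- generic Nodup preservation through a fold
theorem pvNodupFoldl {α β : Type} (step : List β → α → List β)
    (h : ∀ s e, s.Nodup → (step s e).Nodup) :
    ∀ (l : List α) (s0 : List β), s0.Nodup → (l.foldl step s0).Nodup := by
  intro l
  induction l with
  | nil => intro s0 hs; simpa using hs
  | cons e t ih => intro s0 hs; exact ih _ (h s0 e hs)

-- two space positions of ' y ' delimiting x  ⟺  ' x ' is a substring of ' y '
theorem pvSegIff (x y : List Char) :
    pvW x y ↔
      ∃ p q : Nat, p < q ∧ q < (' ' :: (y ++ [' '])).length ∧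
        (' ' :: (y ++ [' ']))[p]? = some ' ' ∧ (' ' :: (y ++ [' ']))[q]? = some ' ' ∧
        ((' ' :: (y ++ [' '])).drop (p + 1)).take (q - (p + 1)) = x := by
  unfold pvW
  constructor
  · rintro ⟨pre, suf, hps⟩
    have hlc := congrArg List.length hps
    simp only [List.length_append, List.length_cons] at hlc
    refine ⟨pre.length, pre.length + x.length + 1, by omega, ?_, ?_, ?_, ?_⟩
    · simp only [List.length_cons, List.length_append, List.length_nil]
      omega
    · rw [← hps]
      have h1 : pre ++ (' ' :: (x ++ [' '])) ++ suf = pre ++ ((' ' :: (x ++ [' '])) ++ suf) := by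
        simp
      rw [h1, List.getElem?_append_right (Nat.le_refl _)]
      simp
    · rw [← hps]
      have h1 : pre ++ (' ' :: (x ++ [' '])) ++ suf = (pre ++ ' ' :: x) ++ ([' '] ++ suf) := by
        simp
      rw [h1, List.getElem?_append_right (by
        simp only [List.length_append, List.length_cons]; omega)]
      have h2 : pre.length + x.length + 1 - (pre ++ ' ' :: x).length = 0 := by
        simp only [List.length_append, List.length_cons]; omega
      rw [h2]
      simp
    · rw [← hps]
      have h1 : pre ++ (' ' :: (x ++ [' '])) ++ suf = (pre ++ [' ']) ++ (x ++ ([' '] ++ suf)) := by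
        simp
      rw [h1]
      have h2 : pre.length + 1 = (pre ++ [' ']).length := by simp
      rw [h2, List.drop_left]
      have h3 : pre.length + x.length + 1 - (pre ++ [' ']).length = x.length := by
        simp only [List.length_append, List.length_cons, List.length_nil]; omega
      rw [h3, List.take_left]
  · rintro ⟨p, q, hpq, hqlen, hp, hq, hseg⟩
    have hplen : p < (' ' :: (y ++ [' '])).length := lt_trans hpq hqlen
    have hpe : (' ' :: (y ++ [' ']))[p] = ' ' := by
      rw [List.getElem?_eq_getElem hplen] at hp; exact Option.some.inj hp
    have hqe : (' ' :: (y ++ [' ']))[q] = ' ' := by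
      rw [List.getElem?_eq_getElem hqlen] at hq; exact Option.some.inj hq
    have h1 : (' ' :: (y ++ [' '])).drop p = ' ' :: (' ' :: (y ++ [' '])).drop (p + 1) := by
      rw [List.drop_eq_getElem_cons hplen, hpe]
    have h3 : (' ' :: (y ++ [' '])).drop q = ' ' :: (' ' :: (y ++ [' '])).drop (q + 1) := by
      rw [List.drop_eq_getElem_cons hqlen, hqe]
    have h2 : (' ' :: (y ++ [' '])).drop (p + 1) = x ++ (' ' :: (y ++ [' '])).drop q := by
      conv_lhs => rw [← List.take_append_drop (q - (p + 1)) ((' ' :: (y ++ [' '])).drop (p + 1))]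
      rw [hseg, List.drop_drop, Nat.add_sub_cancel' (show p + 1 ≤ q by omega)]
    refine ⟨(' ' :: (y ++ [' '])).take p, (' ' :: (y ++ [' '])).drop (q + 1), ?_⟩
    conv_rhs => rw [← List.take_append_drop p (' ' :: (y ++ [' ']))]
    rw [h1, h2, h3]
    simp

-- l₁ ++ [c] = l₂ ++ [d] → l₁ = l₂ ∧ c = d
theorem pvSnoc {α : Type} {l₁ l₂ : List α} {c d : α}
    (h : l₁ ++ [c] = l₂ ++ [d]) : l₁ = l₂ ∧ c = d := by
  have h' := congrArg List.reverse h
  simp at h'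
  obtain ⟨hc, hl⟩ := h'
  exact ⟨by simpa using congrArg List.reverse hl, hc⟩

-- A's three checks  ⟺  wrapped containment plus distinctness
theorem pvExists_iff (x y : String) :
    pvExists x y = true ↔ pvW x.toList y.toList ∧ x ≠ y := by
  have hb : pvExists x y = true ↔
      ((' ' :: (x.toList ++ [' '])) <:+: y.toList ∨
       (' ' :: x.toList) <:+ y.toList ∨
       (x.toList ++ [' ']) <+: y.toList) := by
    unfold pvExists
    split_ifs with h1 h2 h3
    · simp only [true_iff]
      exact Or.inl ((PySem.Chars.isIn_iff_infix _ _).mp h1)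
    · simp only [true_iff]
      exact Or.inr (Or.inl ((PySem.Chars.endswith_iff _ _).mp h2))
    · simp only [true_iff]
      exact Or.inr (Or.inr ((PySem.Chars.startswith_iff _ _).mp h3))
    · simp only [false_iff]
      rintro (hc | hc | hc)
      · exact h1 ((PySem.Chars.isIn_iff_infix _ _).mpr hc)
      · exact h2 ((PySem.Chars.endswith_iff _ _).mpr hc)
      · exact h3 ((PySem.Chars.startswith_iff _ _).mpr hc)
  rw [hb]
  have hnexy : ∀ {a b : String}, a.toList.length ≠ b.toList.length → a ≠ b := by
    intro a b hl hab; exact hl (by rw [hab])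
  unfold pvW
  constructor
  · rintro (⟨s, t, hst⟩ | ⟨t, ht⟩ | ⟨t, ht⟩)
    · have hlc := congrArg List.length hst
      simp only [List.length_append, List.length_cons, List.length_nil] at hlc
      refine ⟨⟨' ' :: s, t ++ [' '], by rw [← hst]; simp⟩, hnexy (by omega)⟩
    · have hlc := congrArg List.length ht
      simp only [List.length_append, List.length_cons, List.length_nil] at hlc
      refine ⟨⟨' ' :: t, [], by rw [← ht]; simp⟩, hnexy (by omega)⟩
    · have hlc := congrArg List.length ht
      simp only [List.length_append, List.length_cons, List.length_nil] at hlc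
      refine ⟨⟨[], t ++ [' '], by rw [← ht]; simp⟩, hnexy (by omega)⟩
  · rintro ⟨⟨pre, suf, heq⟩, hne⟩
    have hnel : x.toList ≠ y.toList := fun hc => hne (String.toList_inj.mp hc)
    match pre with
    | [] =>
        simp only [List.nil_append, List.cons_append] at heq
        injection heq with _ heq'
        rcases List.eq_nil_or_concat suf with rfl | ⟨s', c, rfl⟩
        · simp only [List.append_nil] at heq'
          obtain ⟨hl, -⟩ := pvSnoc heq'
          exact absurd hl hnel
        · have h4 : (x.toList ++ [' '] ++ s') ++ [c] = y.toList ++ [' '] := by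
            simpa [List.concat_eq_append, List.append_assoc] using heq'
          obtain ⟨hl, -⟩ := pvSnoc h4
          exact Or.inr (Or.inr ⟨s', by rw [← hl]; try simp [List.append_assoc]⟩)
    | c :: pre' =>
        simp only [List.cons_append] at heq
        injection heq with hc heq'
        subst hc
        rcases List.eq_nil_or_concat suf with rfl | ⟨s', d, rfl⟩
        · have h4 : (pre' ++ ' ' :: x.toList) ++ [' '] = y.toList ++ [' '] := by
            simpa [List.concat_eq_append, List.append_assoc] using heq'
          obtain ⟨hl, -⟩ := pvSnoc h4
          exact Or.inr (Or.inl ⟨pre', by rw [← hl]⟩)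
        · have h4 : (pre' ++ (' ' :: (x.toList ++ [' '])) ++ s') ++ [d] = y.toList ++ [' '] := by
            simpa [List.concat_eq_append, List.append_assoc] using heq'
          obtain ⟨hl, -⟩ := pvSnoc h4
          exact Or.inl ⟨pre', s', by rw [← hl]; try simp [List.append_assoc]⟩

-- evaluation of sorted({i1, i2}) for distinct strings
theorem pvSortedPairEval (i1 i2 : String) (hne : i1 ≠ i2) :
    pvSortedPair i1 i2 =
      if i2.toList < i1.toList then [i2, i1] else [i1, i2] := by
  unfold pvSortedPair
  have hof : PySem.Set.ofList [i1, i2] = [i1, i2] := by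
    simp [PySem.Set.ofList, PySem.Set.add, PySem.Set.contains, List.contains_eq_mem, Ne.symm hne]
  rw [hof, PySem.List.sorted_eq_foldl_insertBy]
  simp only [List.foldl_cons, List.foldl_nil]
  by_cases h : i2.toList < i1.toList
  · simp [PySem.List.insertBy, h]
  · simp [PySem.List.insertBy, h]

-- membership in A's excludes set
theorem pvMemExcludes (tokens : List String) (x : String) :
    x ∈ pvExcludes tokens ↔
      x ∈ tokens ∧ ∃ z ∈ tokens, x.toList < z.toList ∧ pvW x.toList z.toList := by
  have hpairs : ∀ pr : List String, pr ∈ pvPairs tokens ↔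
      ∃ i1 ∈ tokens, ∃ i2 ∈ tokens, i1 ≠ i2 ∧ pr = pvSortedPair i1 i2 := by
    intro pr
    unfold pvPairs
    rw [pvMemFoldl _ (fun i1 pr => ∃ i2 ∈ tokens, i1 ≠ i2 ∧ pr = pvSortedPair i1 i2) ?_ tokens [] pr]
    · simp
    · intro s e z
      rw [pvMemFoldl _ (fun i2 z => z = pvSortedPair e i2) (by intro s' e' z'; simp) _ s z]
      simp [List.mem_filter, bne_iff_ne]
      constructor
      · rintro (hs | ⟨i2, ⟨hi2, hne⟩, rfl⟩)
        · exact Or.inl hs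
        · exact Or.inr ⟨i2, hi2, hne, rfl⟩
      · rintro (hs | ⟨i2, hi2, hne, rfl⟩)
        · exact Or.inl hs
        · exact Or.inr ⟨i2, ⟨hi2, hne⟩, rfl⟩
  unfold pvExcludes
  rw [pvMemFoldl _
    (fun pr x => pvExists (PySem.List.pyGetD pr 0 "") (PySem.List.pyGetD pr 1 "") = true ∧
      x = PySem.List.pyGetD pr 0 "") ?_ _ [] x]
  swap
  · intro s pr z
    split_ifs with hc
    · simp [PySem.Set.mem_add, hc]
    · simp [hc]
  simp only [List.not_mem_nil, false_or]
  constructor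
  · rintro ⟨pr, hpr, hex, rfl⟩
    obtain ⟨i1, hi1, i2, hi2, hne, rfl⟩ := (hpairs pr).mp hpr
    rw [pvSortedPairEval i1 i2 hne] at hex ⊢
    by_cases h : i2.toList < i1.toList
    · simp only [h, if_true] at hex ⊢
      have hg0 : PySem.List.pyGetD [i2, i1] (0 : Int) "" = i2 := by
        simp [PySem.List.pyGetD_zero_cons]
      have hg1 : PySem.List.pyGetD [i2, i1] (1 : Int) "" = i1 := by
        simpa using PySem.List.pyGetD_ofNat (xs := [i2, i1]) (n := 1) (d := "") (by simp)
      rw [hg0, hg1] at hex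
      rw [hg0]
      obtain ⟨hw, -⟩ := (pvExists_iff i2 i1).mp hex
      exact ⟨hi2, i1, hi1, h, hw⟩
    · simp only [h, if_false] at hex ⊢
      have hg0 : PySem.List.pyGetD [i1, i2] (0 : Int) "" = i1 := by
        simp [PySem.List.pyGetD_zero_cons]
      have hg1 : PySem.List.pyGetD [i1, i2] (1 : Int) "" = i2 := by
        simpa using PySem.List.pyGetD_ofNat (xs := [i1, i2]) (n := 1) (d := "") (by simp)
      rw [hg0, hg1] at hex
      rw [hg0]
      obtain ⟨hw, -⟩ := (pvExists_iff i1 i2).mp hex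
      have hlt : i1.toList < i2.toList := by
        rcases pvTri i1.toList i2.toList with h' | h' | h'
        · exact h'
        · exact absurd (String.toList_inj.mp h') hne
        · exact absurd h' h
      exact ⟨hi1, i2, hi2, hlt, hw⟩
  · rintro ⟨hx, z, hz, hlt, hw⟩
    have hne : x ≠ z := by
      intro hc; subst hc; exact pvIrrefl _ hlt
    refine ⟨pvSortedPair x z, (hpairs _).mpr ⟨x, hx, z, hz, hne, rfl⟩, ?_, ?_⟩
    · rw [pvSortedPairEval x z hne]
      simp only [pvAsymm hlt, if_false]
      have hg0 : PySem.List.pyGetD [x, z] (0 : Int) "" = x := by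
        simp [PySem.List.pyGetD_zero_cons]
      have hg1 : PySem.List.pyGetD [x, z] (1 : Int) "" = z := by
        simpa using PySem.List.pyGetD_ofNat (xs := [x, z]) (n := 1) (d := "") (by simp)
      rw [hg0, hg1]
      exact (pvExists_iff x z).mpr ⟨hw, hne⟩
    · rw [pvSortedPairEval x z hne]
      simp [pvAsymm hlt, PySem.List.pyGetD_zero_cons]

-- the spaces list of ' y ': exactly the positions of spaces, strictly increasing
theorem pvSpacesMem (wy : List Char) (v : Int) :
    v ∈ pvSpaces wy ↔ ∃ k : Nat, k < wy.length ∧ v = (k : Int) ∧ wy[k]? = some ' ' := by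
  unfold pvSpaces
  simp only [List.mem_map, List.mem_filter, PySem.List.mem_enumerate_iff]
  constructor
  · rintro ⟨⟨i, c⟩, ⟨⟨k, hk, hpk⟩, hsp⟩, rfl⟩
    injection hpk with h1 h2
    refine ⟨k, hk, by simp [h1], ?_⟩
    rw [List.getElem?_eq_getElem hk]
    simp only [beq_iff_eq] at hsp
    rw [← h2, hsp]
  · rintro ⟨k, hk, rfl, hke⟩
    have hkel : wy[k] = ' ' := by
      rw [List.getElem?_eq_getElem hk] at hke; exact Option.some.inj hke
    exact ⟨((0 : Int) + (k : Int), wy[k]), ⟨⟨k, hk, rfl⟩, by simp [hkel]⟩, by simp⟩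

theorem pvSpacesSorted (wy : List Char) : (pvSpaces wy).Pairwise (· < ·) := by
  unfold pvSpaces
  apply List.Pairwise.map
  · exact fun {a b} h => h
  · exact List.Pairwise.filter _ (PySem.List.pairwise_lt_enumerate wy 0)

-- the candidate string cut out by space positions a and b of ' y '
def pvQinStr (y : String) (a b : Int) : String :=
  String.ofList (PySem.List.slice (' ' :: (y.toList ++ [' ']))
    (some (PySem.List.pyGetD (pvSpaces (' ' :: (y.toList ++ [' ']))) a 0 + 1))
    (some (PySem.List.pyGetD (pvSpaces (' ' :: (y.toList ++ [' ']))) b 0)))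

-- the inner condition of B's nested loop, as a predicate on (a, b, candidate)
def pvQin (tokens : List String) (y : String) (a b : Int) (z : String) : Prop :=
  pvQinStr y a b ≠ y ∧
  PySem.Set.contains (PySem.Set.ofList tokens) (pvQinStr y a b) = true ∧
  z = pvQinStr y a b

-- the double index loop over space positions finds exactly the word-contained tokens
theorem pvQinIff (tokens : List String) (y z : String) :
    (∃ a ∈ PySem.List.pyRange 0 ((pvSpaces (' ' :: (y.toList ++ [' ']))).length : Int) 1,
     ∃ b ∈ PySem.List.pyRange (a + 1) ((pvSpaces (' ' :: (y.toList ++ [' ']))).length : Int) 1,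
       pvQin tokens y a b z) ↔
    (z ∈ tokens ∧ z ≠ y ∧ pvW z.toList y.toList) := by
  set wy : List Char := ' ' :: (y.toList ++ [' ']) with hwy
  set sp := pvSpaces wy with hspdef
  have hmemsp : ∀ v : Int, v ∈ sp ↔ ∃ k : Nat, k < wy.length ∧ v = (k : Int) ∧ wy[k]? = some ' ' :=
    fun v => pvSpacesMem wy v
  have hpair := (List.pairwise_iff_getElem).mp (pvSpacesSorted wy)
  constructor
  · rintro ⟨a, ha, b, hb, hQ⟩
    unfold pvQin pvQinStr at hQ
    rw [← hwy, ← hspdef] at hQ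
    obtain ⟨hne, hcon, hzeq⟩ := hQ
    rw [PySem.List.mem_pyRange_one] at ha hb
    have hka : a.toNat < sp.length := by omega
    have hkb : b.toNat < sp.length := by omega
    have hga : PySem.List.pyGetD sp a 0 = sp[a.toNat] :=
      PySem.List.pyGetD_eq_getElem sp 0 ha.1 ha.2
    have hgb : PySem.List.pyGetD sp b 0 = sp[b.toNat] :=
      PySem.List.pyGetD_eq_getElem sp 0 (by omega) hb.2
    obtain ⟨p, hplen, hpe, hpch⟩ := (hmemsp _).mp (List.getElem_mem hka)
    obtain ⟨q, hqlen, hqe, hqch⟩ := (hmemsp _).mp (List.getElem_mem hkb)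
    have hlt : sp[a.toNat] < sp[b.toNat] := hpair a.toNat b.toNat hka hkb (by omega)
    have hpq : p < q := by
      rw [hpe, hqe] at hlt; exact_mod_cast hlt
    have hslice : PySem.List.slice wy (some (PySem.List.pyGetD sp a 0 + 1))
        (some (PySem.List.pyGetD sp b 0)) = (wy.drop (p + 1)).take (q - (p + 1)) := by
      rw [hga, hgb, hpe, hqe]
      rw [show ((p : Int) + 1) = ((p + 1 : Nat) : Int) by push_cast; ring]
      exact PySem.List.slice_natCast wy (p + 1) q
    rw [hslice] at hzeq hcon hne
    refine ⟨?_, ?_, ?_⟩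
    · rw [hzeq]
      exact (PySem.Set.mem_ofList tokens _).mp ((PySem.Set.contains_iff _ _).mp hcon)
    · rw [hzeq]; exact hne
    · rw [pvSegIff, ← hwy]
      exact ⟨p, q, hpq, hqlen, hpch, hqch, by rw [hzeq, String.toList_ofList]⟩
  · rintro ⟨hz, hne, hw⟩
    rw [pvSegIff, ← hwy] at hw
    obtain ⟨p, q, hpq, hqlen, hpch, hqch, hseg⟩ := hw
    have hplen : p < wy.length := lt_trans hpq hqlen
    have hpm : ((p : Nat) : Int) ∈ sp := (hmemsp _).mpr ⟨p, hplen, rfl, hpch⟩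
    have hqm : ((q : Nat) : Int) ∈ sp := (hmemsp _).mpr ⟨q, hqlen, rfl, hqch⟩
    obtain ⟨ia, hia, hiae⟩ := List.mem_iff_getElem.mp hpm
    obtain ⟨ib, hib, hibe⟩ := List.mem_iff_getElem.mp hqm
    have hiaib : ia < ib := by
      rcases Nat.lt_trichotomy ia ib with h | h | h
      · exact h
      · exfalso
        subst h
        rw [hiae] at hibe
        have h5 : p = q := by exact_mod_cast hibe
        omega
      · exfalso
        have hgt := hpair ib ia hib hia h
        rw [hiae, hibe] at hgt
        have h5 : (q : Int) < (p : Int) := hgt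
        omega
    have hga : PySem.List.pyGetD sp ((ia : Nat) : Int) 0 = sp[ia] :=
      PySem.List.pyGetD_ofNat sp ia 0 hia
    have hgb : PySem.List.pyGetD sp ((ib : Nat) : Int) 0 = sp[ib] :=
      PySem.List.pyGetD_ofNat sp ib 0 hib
    have hslice : PySem.List.slice wy (some (PySem.List.pyGetD sp ((ia : Nat) : Int) 0 + 1))
        (some (PySem.List.pyGetD sp ((ib : Nat) : Int) 0)) = (wy.drop (p + 1)).take (q - (p + 1)) := by
      rw [hga, hgb, hiae, hibe]
      rw [show ((p : Int) + 1) = ((p + 1 : Nat) : Int) by push_cast; ring]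
      exact PySem.List.slice_natCast wy (p + 1) q
    have hsz : String.ofList (PySem.List.slice wy
        (some (PySem.List.pyGetD sp ((ia : Nat) : Int) 0 + 1))
        (some (PySem.List.pyGetD sp ((ib : Nat) : Int) 0))) = z := by
      rw [hslice, hseg, String.ofList_toList]
    refine ⟨((ia : Nat) : Int), ?_, ((ib : Nat) : Int), ?_, ?_⟩
    · rw [PySem.List.mem_pyRange_one]
      exact ⟨Int.natCast_nonneg ia, by exact_mod_cast hia⟩
    · rw [PySem.List.mem_pyRange_one]
      exact ⟨by exact_mod_cast hiaib, by exact_mod_cast hib⟩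
    · unfold pvQin pvQinStr
      rw [← hwy, ← hspdef, hsz]
      exact ⟨hne, (PySem.Set.contains_iff _ _).mpr ((PySem.Set.mem_ofList tokens z).mpr hz), rfl⟩

-- membership in B's subsumed set
theorem pvMemSubsumed (tokens : List String) (x : String) :
    x ∈ pvSubsumed tokens ↔
      x ∈ tokens ∧ ∃ y ∈ tokens, x ≠ y ∧ pvW x.toList y.toList := by
  unfold pvSubsumed
  dsimp only
  refine (pvMemFoldl _
      (fun (y : String) (z : String) => z ∈ tokens ∧ z ≠ y ∧ pvW z.toList y.toList) ?_
      (PySem.Set.ofList tokens) [] x).trans ?_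
  · intro sub y z
    dsimp only
    refine (pvMemFoldl _
        (fun (a : Int) (z : String) =>
          ∃ b ∈ PySem.List.pyRange (a + 1) ((pvSpaces (' ' :: (y.toList ++ [' ']))).length : Int) 1,
            pvQin tokens y a b z) ?_ _ sub z).trans
      (or_congr_right (pvQinIff tokens y z))
    intro sub' a z'
    dsimp only
    refine pvMemFoldl _ (fun (b : Int) (z : String) => pvQin tokens y a b z) ?_ _ sub' z'
    intro sub'' b z''
    dsimp only
    unfold pvQin pvQinStr
    split_ifs with hc
    · rw [PySem.Set.mem_add]
      constructor
      · rintro (h | h)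
        · exact Or.inl h
        · exact Or.inr ⟨hc.1, hc.2, h⟩
      · rintro (h | ⟨-, -, h⟩)
        · exact Or.inl h
        · exact Or.inr h
    · constructor
      · exact Or.inl
      · rintro (h | ⟨h1, h2, -⟩)
        · exact h
        · exact absurd ⟨h1, h2⟩ hc
  · simp only [List.not_mem_nil, false_or]
    constructor
    · rintro ⟨y, hy, hz, hne, hw⟩
      exact ⟨hz, y, (PySem.Set.mem_ofList tokens y).mp hy, hne, hw⟩
    · rintro ⟨hz, y, hy, hne, hw⟩
      exact ⟨y, (PySem.Set.mem_ofList tokens y).mpr hy, hz, hne, hw⟩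

theorem pvNodupExcludes (tokens : List String) : (pvExcludes tokens).Nodup := by
  unfold pvExcludes
  apply pvNodupFoldl _ ?_ _ [] List.nodup_nil
  intro s e hs
  split_ifs
  · exact PySem.Set.nodup_add _ _ hs
  · exact hs

theorem pvNodupSubsumed (tokens : List String) : (pvSubsumed tokens).Nodup := by
  unfold pvSubsumed
  apply pvNodupFoldl _ ?_ _ [] List.nodup_nil
  intro s e hs
  apply pvNodupFoldl _ ?_ _ s hs
  intro s' e' hs'
  apply pvNodupFoldl _ ?_ _ s' hs'
  intro s'' e'' hs''
  dsimp only
  split_ifs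
  · exact PySem.Set.nodup_add _ _ hs''
  · exact hs''

theorem pvAeqSorted (tokens : List String) :
    find_subsumed_tokens tokens =
      PySem.List.sorted (pvExcludes tokens) (fun x => x.toList) false := by
  unfold find_subsumed_tokens
  split_ifs with h
  · have h2 : pvExcludes tokens = [] := by
      simpa [PySem.Set.len] using h
    rw [h2]
    rfl
  · rfl

-- ===== VERDICT (by name: the statement is the Claim_ definition above) =====
theorem find_subsumed_tokens_spec : Claim_unchanged_find_subsumed_tokens := by
  intro tokens _ hnd
  rw [pvAeqSorted]
  unfold find_subsumed_tokens_alt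
  rw [pvSortedBridge, pvSortedBridge]
  apply PySem.List.sorted_eq_sorted_of_perm _ _ _ (fun {a b} hab => String.toList_inj.mp hab)
  rw [List.perm_ext_iff_of_nodup (pvNodupExcludes tokens) (pvNodupSubsumed tokens)]
  intro a
  rw [pvMemExcludes, pvMemSubsumed]
  constructor
  · rintro ⟨ha, z, hz, hlt, hw⟩
    refine ⟨ha, z, hz, ?_, hw⟩
    intro hc
    rw [hc] at hlt
    exact pvIrrefl _ hlt
  · rintro ⟨ha, y, hy, hne, hw⟩
    refine ⟨ha, ?_⟩
    rcases pvTri a.toList y.toList with h | h | h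
    · exact ⟨y, hy, h, hw⟩
    · exact absurd (String.toList_inj.mp h) hne
    · by_contra hnone
      refine hnd ⟨a, ha, y, hy, h, (pvWrap_iff a y).mpr hw, ?_⟩
      intro z' hz' hlt' hinf
      exact hnone ⟨z', hz', hlt', (pvWrap_iff a z').mp hinf⟩

theorem find_subsumed_tokens_changed : Claim_changed_find_subsumed_tokens := by
  unfold Claim_changed_find_subsumed_tokens; decide

theorem find_subsumed_tokens_tight : Claim_exact_find_subsumed_tokens := by
  intro tokens _ hD heq
  obtain ⟨x, hx, z, hz, hlt, hwi, hall⟩ := hD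
  have hne : x ≠ z := by
    intro hc; rw [hc] at hlt; exact pvIrrefl _ hlt
  have hxB : x ∈ find_subsumed_tokens_alt tokens := by
    unfold find_subsumed_tokens_alt
    rw [PySem.List.mem_sorted]
    exact (pvMemSubsumed tokens x).mpr ⟨hx, z, hz, hne, (pvWrap_iff x z).mp hwi⟩
  have hxA : x ∉ find_subsumed_tokens tokens := by
    rw [pvAeqSorted, PySem.List.mem_sorted]
    intro hc
    obtain ⟨-, z', hz', hlt', hw'⟩ := (pvMemExcludes tokens x).mp hc
    exact hall z' hz' hlt' ((pvWrap_iff x z').mpr hw')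
  rw [heq] at hxA
  exact hxA hxB
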